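-- pv_equiv track=rewrite | github.com/Arsen1302/Code-copy-detector | TestData/solutions/problem_1399_3.py | solution_1399_3
-- ===== SOURCE A (Python) =====
-- def solution_1399_3(sentence: str) -> int:
--     a = list(sentence.split())
--     res=0
--     punc = ['!','.',',']
--
--     for s in a:
--         if s!="":
--             num=0
--             for i in range(0,10):
--                 num+=s.count(str(i))
--             if num==0:
--                 k=s.count('-')
--                 if k==0 or (k==1 and s.index('-')!=0 and s.index('-')!=len(s)-1):
--                     num=0
--                     for i in punc:
--                         num+=s.count(i)
--                     if num==0 or (num==1 and s[-1] in punc and (len(s)==1 or s[-2]!='-')):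
--                         res+=1
--     return res
-- ===== SOURCE B (Python) =====
-- def solution_1399_3(sentence: str) -> int:
--     res = 0
--     for w in sentence.split():
--         digits = hyphens = puncts = 0
--         first_h = -1
--         for i, c in enumerate(w):
--             if c in '0123456789':
--                 digits += 1
--             elif c == '-':
--                 hyphens += 1
--                 if first_h < 0:
--                     first_h = i
--             elif c in '!.,':
--                 puncts += 1
--         if digits != 0:
--             continue
--         if hyphens > 1 or (hyphens == 1 and (first_h == 0 or first_h == len(w) - 1)):
--             continue
--         if puncts == 0 or (puncts == 1 and w[-1] in '!.,' and (len(w) == 1 or w[-2] != '-')):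
--             res += 1
--     return res
-- ===== Notes on version B (the rewrite author's own statement) =====
-- stated objective: alternative
-- what changed: Replaces the ~14 substring .count/.index scans per word with a single enumerate pass per word that accumulates digit/hyphen/punctuation counters and the first hyphen index, then applies the same acceptance rules.
import Mathlib
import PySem

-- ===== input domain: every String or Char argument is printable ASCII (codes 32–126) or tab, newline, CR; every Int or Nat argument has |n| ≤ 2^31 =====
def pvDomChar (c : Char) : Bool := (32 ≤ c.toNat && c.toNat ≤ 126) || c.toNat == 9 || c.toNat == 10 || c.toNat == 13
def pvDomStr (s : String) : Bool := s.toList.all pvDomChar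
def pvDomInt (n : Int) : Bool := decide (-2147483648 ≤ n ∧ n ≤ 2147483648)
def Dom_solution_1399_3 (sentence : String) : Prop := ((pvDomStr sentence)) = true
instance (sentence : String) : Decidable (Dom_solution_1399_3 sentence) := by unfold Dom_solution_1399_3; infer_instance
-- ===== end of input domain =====

-- B replaces A's ~14 substring count/index scans per word by one single pass per word that
-- accumulates digit/hyphen/punctuation counters and the first hyphen index (objective: alternative decomposition).


-- ===== PORT A =====
-- punc = ['!','.',','] from A
def pvPunc : List String := ["!", ".", ","]
-- the same three characters as chars (Python's s[-1] is a 1-char string; membership tested on the char)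
def pvPuncChars : List Char := ['!', '.', ',']

-- the loop body of A ('s.index' is ported as PySem.Str.find, equal wherever '-' occurs, which the k = 1 guard ensures;
-- s[-1] / s[-2] are ported with pyGetD: they are only reached when the word is long enough, so the default is never used)
def pvStepA (res : Int) (s : String) : Int :=
  if s ≠ "" then
    let num : Int := (PySem.List.pyRange 0 10 1).foldl
      (fun num i => num + (PySem.Str.count s (PySem.Int.toStr i) : Int)) 0
    if num = 0 then
      let k : Int := (PySem.Str.count s "-" : Int)
      if k = 0 ∨ (k = 1 ∧ PySem.Str.find s "-" ≠ 0 ∧ PySem.Str.find s "-" ≠ PySem.Str.len s - 1) then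
        let num2 : Int := pvPunc.foldl (fun num i => num + (PySem.Str.count s i : Int)) 0
        if num2 = 0 ∨ (num2 = 1 ∧ PySem.List.pyGetD s.toList (-1) ' ' ∈ pvPuncChars ∧
            (PySem.Str.len s = 1 ∨ PySem.List.pyGetD s.toList (-2) ' ' ≠ '-')) then
          res + 1
        else res
      else res
    else res
  else res

def solution_1399_3 (sentence : String) : Int :=
  (PySem.Str.split₀ sentence).foldl pvStepA 0

-- ===== PORT B =====
def pvDigitChars : List Char := ['0','1','2','3','4','5','6','7','8','9']

-- one scan step: state = (digits, hyphens, first hyphen index or -1, puncts)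
def pvScanStep (st : Int × Int × Int × Int) (ic : Int × Char) : Int × Int × Int × Int :=
  if ic.2 ∈ pvDigitChars then (st.1 + 1, st.2.1, st.2.2.1, st.2.2.2)
  else if ic.2 = '-' then (st.1, st.2.1 + 1, if st.2.2.1 < 0 then ic.1 else st.2.2.1, st.2.2.2)
  else if ic.2 ∈ pvPuncChars then (st.1, st.2.1, st.2.2.1, st.2.2.2 + 1)
  else st

def pvStepB (res : Int) (w : String) : Int :=
  let st := (PySem.List.enumerate w.toList).foldl pvScanStep (0, 0, -1, 0)
  if st.1 ≠ 0 then res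
  else if st.2.1 > 1 ∨ (st.2.1 = 1 ∧ (st.2.2.1 = 0 ∨ st.2.2.1 = PySem.Str.len w - 1)) then res
  else if st.2.2.2 = 0 ∨ (st.2.2.2 = 1 ∧ PySem.List.pyGetD w.toList (-1) ' ' ∈ pvPuncChars ∧
      (PySem.Str.len w = 1 ∨ PySem.List.pyGetD w.toList (-2) ' ' ≠ '-')) then res + 1
  else res

def solution_1399_3_alt (sentence : String) : Int :=
  (PySem.Str.split₀ sentence).foldl pvStepB 0

-- ===== PRECONDITION & SPEC =====
def Spec_solution_1399_3 (sentence : String) (out : Int) : Prop := out = solution_1399_3_alt sentence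
instance (sentence : String) (out : Int) : Decidable (Spec_solution_1399_3 sentence out) := by unfold Spec_solution_1399_3; infer_instance

-- ===== CLAIM (what is proved, stated in full; the proofs are below) =====
def Claim_equal_solution_1399_3 : Prop := ∀ (sentence : String), Dom_solution_1399_3 sentence → Spec_solution_1399_3 sentence (solution_1399_3 sentence)

-- ===== LEMMAS AND PROOFS =====

-- first index of c in l (proof-side characterisation shared by both ports)
def pvFirst (c : Char) : List Char → Option Nat
  | [] => none
  | x :: t => if x = c then some 0 else (pvFirst c t).map (· + 1)

def pvFindAux (l : List Char) (s fh : Int) : Int :=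
  match pvFirst '-' l with
  | some j => s + (j : Int)
  | none => fh

theorem pv_count_go_singleton (c : Char) :
    ∀ (l : List Char) (fuel acc : Nat), l.length ≤ fuel →
      PySem.Chars.count.go [c] fuel l acc = acc + l.count c := by
  intro l
  induction l with
  | nil => intro fuel acc h; cases fuel <;> simp [PySem.Chars.count.go]
  | cons x t ih =>
      intro fuel acc h
      cases fuel with
      | zero => simp at h
      | succ f =>
          simp only [PySem.Chars.count.go]
          by_cases hx : x = c
          · simp [List.isPrefixOf, hx, ih f (acc+1) (by simpa using h), List.count_cons]
            omega
          · simp [List.isPrefixOf, hx, Ne.symm hx, ih f acc (by simpa using h), List.count_cons]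


theorem pv_count_singleton (c : Char) (s : String) :
    PySem.Str.count s (String.ofList [c]) = s.toList.count c := by
  rw [PySem.Str.count_eq]
  have h : (String.ofList [c]).toList = [c] := by simp
  rw [h]
  simp only [PySem.Chars.count]
  rw [if_neg (by simp), pv_count_go_singleton c s.toList s.toList.length 0 le_rfl]
  simp


theorem pv_find_go (l : List Char) : ∀ (k : Nat),
    PySem.Chars.find.go ['-'] l k = pvFindAux l k (-1) := by
  induction l with
  | nil => intro k; simp [PySem.Chars.find.go, pvFindAux, pvFirst]
  | cons x t ih =>
      intro k
      simp only [PySem.Chars.find.go]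
      by_cases hx : x = '-'
      · simp [List.isPrefixOf, hx, pvFindAux, pvFirst]
      · have hb : ((('-':Char) == x) && true) = false := by simp [Ne.symm hx]
        simp only [List.isPrefixOf, hb, Bool.false_eq_true, if_false, ih (k+1)]
        simp only [pvFindAux, pvFirst, hx, if_false]
        cases h : pvFirst '-' t <;> simp [h] <;> omega


theorem pv_find_eq (s : String) :
    PySem.Str.find s "-" = pvFindAux s.toList 0 (-1) := by
  rw [PySem.Str.find_eq, show ("-").toList = ['-'] by decide]
  simp only [PySem.Chars.find]
  exact pv_find_go s.toList 0


theorem pv_findAux_cons (c : Char) (t : List Char) (hc : c ≠ '-') (s fh : Int) :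
    pvFindAux (c :: t) s fh = pvFindAux t (s + 1) fh := by
  simp only [pvFindAux, pvFirst, hc, if_false]
  cases h : pvFirst '-' t <;> simp [h] <;> omega


theorem pv_scan_spec : ∀ (l : List Char) (s d h fh pn : Int), 0 ≤ s →
    (PySem.List.enumerate l s).foldl pvScanStep (d, h, fh, pn)
      = (d + (l.countP (· ∈ pvDigitChars) : Int),
         h + (l.count '-' : Int),
         (if fh < 0 then pvFindAux l s fh else fh),
         pn + (l.countP (· ∈ pvPuncChars) : Int)) := by
  intro l
  induction l with
  | nil => intro s d h fh pn hs; simp [PySem.List.enumerate, pvFindAux, pvFirst]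
  | cons c t ih =>
      intro s d h fh pn hs
      rw [PySem.List.enumerate_cons, List.foldl_cons]
      by_cases hd : c ∈ pvDigitChars
      · have hc : c ≠ '-' := by fin_cases hd <;> decide
        have hp : c ∉ pvPuncChars := by fin_cases hd <;> decide
        simp only [pvScanStep, hd, if_true, if_pos]
        rw [ih (s+1) (d+1) h fh pn (by omega), pv_findAux_cons c t hc s fh]
        simp [List.countP_cons, List.count_cons, hd, hc, hp, Ne.symm hc, Prod.ext_iff]
        omega
      · by_cases hh : c = '-'
        · subst hh
          simp only [pvScanStep, hd, if_false, if_pos rfl, if_true]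
          have hp : ('-' : Char) ∉ pvPuncChars := by decide
          rw [ih (s+1) d (h+1) (if fh < 0 then s else fh) pn (by omega)]
          have hfh : (if (if fh < 0 then s else fh) < 0 then pvFindAux t (s+1) (if fh < 0 then s else fh)
              else (if fh < 0 then s else fh)) = (if fh < 0 then pvFindAux ('-' :: t) s fh else fh) := by
            by_cases h0 : fh < 0
            · simp [h0, pvFindAux, pvFirst, show ¬ s < 0 by omega]
            · simp [h0]
          rw [hfh]
          simp [List.countP_cons, List.count_cons, hd, hp, Prod.ext_iff]
          omega
        · by_cases hp : c ∈ pvPuncChars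
          · simp only [pvScanStep, hd, hh, if_false, hp, if_true, if_pos]
            rw [ih (s+1) d h fh (pn+1) (by omega), pv_findAux_cons c t hh s fh]
            simp [List.countP_cons, List.count_cons, hd, hh, hp, Ne.symm hh, Prod.ext_iff]
            omega
          · simp only [pvScanStep, hd, hh, hp, if_false]
            rw [ih (s+1) d h fh pn (by omega), pv_findAux_cons c t hh s fh]
            simp [List.countP_cons, List.count_cons, hd, hh, hp, Ne.symm hh, Prod.ext_iff]


theorem pv_digit10 (l : List Char) :
    l.count '0' + l.count '1' + l.count '2' + l.count '3' + l.count '4' + l.count '5'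
      + l.count '6' + l.count '7' + l.count '8' + l.count '9'
      = l.countP (· ∈ pvDigitChars) := by
  induction l with
  | nil => simp
  | cons c t ih =>
      simp only [List.count_cons, List.countP_cons, ← ih]
      by_cases hc : c ∈ pvDigitChars
      · fin_cases hc <;> simp [pvDigitChars] <;> omega
      · simp only [pvDigitChars, List.mem_cons, List.not_mem_nil, or_false, not_or] at hc
        obtain ⟨h0,h1,h2,h3,h4,h5,h6,h7,h8,h9⟩ := hc
        simp [h0,h1,h2,h3,h4,h5,h6,h7,h8,h9, pvDigitChars]


theorem pv_punct3 (l : List Char) :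
    l.count '!' + l.count '.' + l.count ',' = l.countP (· ∈ pvPuncChars) := by
  induction l with
  | nil => simp
  | cons c t ih =>
      simp only [List.count_cons, List.countP_cons, ← ih]
      by_cases hc : c ∈ pvPuncChars
      · fin_cases hc <;> simp [pvPuncChars] <;> omega
      · simp only [pvPuncChars, List.mem_cons, List.not_mem_nil, or_false, not_or] at hc
        obtain ⟨h0,h1,h2⟩ := hc
        simp [h0,h1,h2, pvPuncChars]


theorem pv_numA (s : String) :
    (PySem.List.pyRange 0 10 1).foldl
      (fun num i => num + (PySem.Str.count s (PySem.Int.toStr i) : Int)) 0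
    = (s.toList.countP (· ∈ pvDigitChars) : Int) := by
  rw [show PySem.List.pyRange 0 10 1 = [0,1,2,3,4,5,6,7,8,9] from by decide]
  simp only [List.foldl]
  rw [show PySem.Int.toStr 0 = String.ofList ['0'] from by decide,
      show PySem.Int.toStr 1 = String.ofList ['1'] from by decide,
      show PySem.Int.toStr 2 = String.ofList ['2'] from by decide,
      show PySem.Int.toStr 3 = String.ofList ['3'] from by decide,
      show PySem.Int.toStr 4 = String.ofList ['4'] from by decide,
      show PySem.Int.toStr 5 = String.ofList ['5'] from by decide,
      show PySem.Int.toStr 6 = String.ofList ['6'] from by decide,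
      show PySem.Int.toStr 7 = String.ofList ['7'] from by decide,
      show PySem.Int.toStr 8 = String.ofList ['8'] from by decide,
      show PySem.Int.toStr 9 = String.ofList ['9'] from by decide]
  simp only [pv_count_singleton]
  rw [← pv_digit10]
  push_cast
  ring


theorem pv_num2 (s : String) :
    pvPunc.foldl (fun num i => num + (PySem.Str.count s i : Int)) 0
    = (s.toList.countP (· ∈ pvPuncChars) : Int) := by
  simp only [pvPunc, List.foldl]
  rw [show ("!" : String) = String.ofList ['!'] from by decide,
      show ("." : String) = String.ofList ['.'] from by decide,
      show ("," : String) = String.ofList [','] from by decide]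
  simp only [pv_count_singleton]
  rw [← pv_punct3]
  push_cast
  ring


theorem pv_word_eq (res : Int) (w : String) (hw : w.toList ≠ []) :
    pvStepA res w = pvStepB res w := by
  have hw' : w ≠ "" := by rintro rfl; exact hw (by decide)
  have hcount : (PySem.Str.count w "-" : Int) = (w.toList.count '-' : Int) := by
    rw [show ("-" : String) = String.ofList ['-'] from by decide, pv_count_singleton]
  simp only [pvStepA, pvStepB, hw', ne_eq, not_false_eq_true, if_true, pv_numA, pv_num2,
    hcount, pv_find_eq, pv_scan_spec w.toList 0 0 0 (-1) 0 le_rfl]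
  simp only [show ((-1:Int) < 0) = True by simp, if_true, zero_add]
  by_cases h1 : (w.toList.countP (· ∈ pvDigitChars) : Int) = 0
  · rw [if_pos h1, if_neg (not_not_intro h1)]
    by_cases h2 : (w.toList.count '-' : Int) = 0 ∨ ((w.toList.count '-' : Int) = 1 ∧
        pvFindAux w.toList 0 (-1) ≠ 0 ∧ pvFindAux w.toList 0 (-1) ≠ PySem.Str.len w - 1)
    · have hSH : ¬ ((w.toList.count '-' : Int) > 1 ∨ ((w.toList.count '-' : Int) = 1 ∧
          (pvFindAux w.toList 0 (-1) = 0 ∨ pvFindAux w.toList 0 (-1) = PySem.Str.len w - 1))) := by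
        omega
      rw [if_pos h2, if_neg hSH]
    · have hSH : ((w.toList.count '-' : Int) > 1 ∨ ((w.toList.count '-' : Int) = 1 ∧
          (pvFindAux w.toList 0 (-1) = 0 ∨ pvFindAux w.toList 0 (-1) = PySem.Str.len w - 1))) := by
        omega
      rw [if_neg h2, if_pos hSH]
  · rw [if_neg h1, if_pos h1]

theorem pv_split₀_go_ne :
    ∀ (rest cur : List Char) (acc : List (List Char)), (∀ x ∈ acc, x ≠ []) →
      ∀ w ∈ PySem.Chars.split₀.go rest cur acc, w ≠ [] := by
  intro rest
  induction rest with
  | nil =>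
      intro cur acc hacc w hw
      simp only [PySem.Chars.split₀.go] at hw
      by_cases hc : cur.isEmpty
      · rw [if_pos hc] at hw; simp at hw; exact hacc w hw
      · rw [if_neg hc] at hw; simp at hw
        rcases hw with hw | hw
        · exact hacc w hw
        · subst hw; simpa [List.isEmpty_iff] using hc
  | cons c rest ih =>
      intro cur acc hacc w hw
      simp only [PySem.Chars.split₀.go] at hw
      by_cases hs : PySem.Chars.isspace c
      · rw [if_pos hs] at hw
        by_cases hc : cur.isEmpty
        · rw [if_pos hc] at hw; exact ih [] acc hacc w hw
        · rw [if_neg hc] at hw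
          refine ih [] (cur.reverse :: acc) ?_ w hw
          intro x hx
          rcases List.mem_cons.mp hx with hx | hx
          · subst hx; simpa [List.isEmpty_iff] using hc
          · exact hacc x hx
      · rw [if_neg hs] at hw; exact ih (c :: cur) acc hacc w hw


theorem pv_mem_split₀_ne (s w : String) (h : w ∈ PySem.Str.split₀ s) : w.toList ≠ [] := by
  have h2 : w.toList ∈ (PySem.Str.split₀ s).map String.toList := List.mem_map_of_mem h
  rw [PySem.Str.split₀_map_toList] at h2
  unfold PySem.Chars.split₀ at h2
  exact pv_split₀_go_ne s.toList [] [] (by simp) w.toList h2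


-- ===== VERDICT (by name: the statement is the Claim_ definition above) =====
theorem solution_1399_3_spec : Claim_equal_solution_1399_3 := by
  intro sentence _
  unfold Spec_solution_1399_3 solution_1399_3 solution_1399_3_alt
  exact PySem.List.foldl_congr_mem _ _ _ _
    (fun res w hw => pv_word_eq res w (pv_mem_split₀_ne sentence w hw))
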